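-- pv_equiv track=rewrite | github.com/dodohyun0807/Algorithm | Programmers/둘만의 암호.py | solution
-- ===== SOURCE A (Python) =====
-- def solution(s, skip, index):
--     answer = ''
--     alp = []
--
--     for i in range(97, 123):
--         tmp = chr(i)
--         alp.append(tmp)
--
--     for i in s:
--         idx = alp.index(i)
--         cnt = 0
--
--         while True:
--             if idx == len(alp):
--                 idx = 0
--                 continue
--
--             if alp[idx] in skip:
--                 idx += 1
--                 continue
--
--             if cnt == int(index):
--                 answer += alp[idx]
--                 break
--
--             cnt += 1
--             idx += 1
--
--     return answer
-- ===== SOURCE B (Python) =====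
-- def solution(s, skip, index):
--     valid = [c for c in "abcdefghijklmnopqrstuvwxyz" if c not in skip]
--     nv = len(valid)
--     out = []
--     for ch in s:
--         r = sum(1 for v in valid if v < ch)
--         out.append(valid[(r + index) % nv])
--     return ''.join(out)
-- ===== Notes on version B (the rewrite author's own statement) =====
-- stated objective: faster
-- what changed: A walks the alphabet one position at a time counting index steps per character (O(index) per character); B precomputes the non-skip letters once and returns valids[(rank_of_letter + index) % len(valids)] in O(1) per character.
import Mathlib
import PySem

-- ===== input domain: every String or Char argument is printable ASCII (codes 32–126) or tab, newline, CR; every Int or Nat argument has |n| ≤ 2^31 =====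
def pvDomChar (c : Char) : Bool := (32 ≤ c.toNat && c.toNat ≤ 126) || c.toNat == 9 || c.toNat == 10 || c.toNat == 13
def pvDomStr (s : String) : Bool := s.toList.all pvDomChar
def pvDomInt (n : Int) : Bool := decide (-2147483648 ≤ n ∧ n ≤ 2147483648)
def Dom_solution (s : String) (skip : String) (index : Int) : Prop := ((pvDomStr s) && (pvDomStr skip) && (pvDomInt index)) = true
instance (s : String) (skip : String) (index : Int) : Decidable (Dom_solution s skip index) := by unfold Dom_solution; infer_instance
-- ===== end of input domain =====

-- B replaces A's per-character counting walk over the alphabet (O(index) steps per character)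
-- by precomputing the non-skip letters once and picking valids[(rank + index) % len(valids)]; objective: faster.

-- ===== PORT A =====
-- 'c in skip' for the single character c (Python substring membership)
def pvInSkip (skip : String) (c : Char) : Bool := PySem.Str.isIn (String.ofList [c]) skip

-- chr(i); exact for the code points 97..122 used here
def pvChr (i : Int) : Char := Char.ofNat i.toNat

-- A's 'while True' loop; the fuel argument only totalizes the unbounded loop
-- (none = the loop does not exit within fuel, or IndexError; Pre_ excludes those inputs)
def solLoop (alp : List Char) (skip : String) (index : Int) : Nat → Nat → Int → Option Char
  | 0, _, _ => none
  | fuel+1, idx, cnt =>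
    if idx = alp.length then solLoop alp skip index fuel 0 cnt
    else match alp[idx]? with
      | none => none
      | some c =>
        if pvInSkip skip c then solLoop alp skip index fuel (idx+1) cnt
        else if cnt = index then some c
        else solLoop alp skip index fuel (idx+1) (cnt+1)

def solution (s : String) (skip : String) (index : Int) : String :=
  let alp : List Char := (PySem.List.pyRange 97 123 1).foldl (fun acc i => acc ++ [pvChr i]) []
  let r := s.toList.foldl (fun (acc : Option (List Char)) i =>
      acc.bind fun answer =>
      (PySem.List.index? alp i).bind fun idx =>
      (solLoop alp skip index (60 * (index.toNat + 2)) idx 0).map fun ch => answer ++ [ch])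
    (some [])
  String.ofList (r.getD [])

-- ===== PORT B =====
def solution_alt (s : String) (skip : String) (index : Int) : String :=
  let valid : List Char := "abcdefghijklmnopqrstuvwxyz".toList.filter (fun c => !pvInSkip skip c)
  let nv : Int := (valid.length : Int)
  String.ofList (s.toList.map (fun ch =>
    let r : Int := (valid.countP (fun v => decide (v < ch)) : Int)
    ((PySem.Int.mod? (r + index) nv).bind (fun m => PySem.List.pyGet? valid m)).getD ' '))

-- ===== PRECONDITION & SPEC =====
-- Pre_ is exactly where A returns: every character of s must be a lowercase letter
-- (else alp.index raises ValueError), and if s is nonempty the while-loop must exit,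
-- i.e. index ≥ 0 and at least one lowercase letter is not skipped (else A loops forever).
def Pre_solution (s : String) (skip : String) (index : Int) : Prop :=
  (s.toList.all (fun c => decide (97 ≤ c.toNat) && decide (c.toNat ≤ 122))
    && (s.toList.isEmpty
        || (decide (0 ≤ index)
            && "abcdefghijklmnopqrstuvwxyz".toList.any (fun c => !(skip.toList.contains c))))) = true
instance (s : String) (skip : String) (index : Int) : Decidable (Pre_solution s skip index) := by
  unfold Pre_solution; infer_instance

def pvWitness_solution : String × String × Int := ("a", "", 0)

def Spec_solution (s : String) (skip : String) (index : Int) (out : String) : Prop := out = solution_alt s skip index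
instance (s : String) (skip : String) (index : Int) (out : String) : Decidable (Spec_solution s skip index out) := by unfold Spec_solution; infer_instance

-- ===== CLAIM (what is proved, stated in full; the proofs are below) =====
def Claim_equal_solution : Prop := ∀ (s : String) (skip : String) (index : Int), Dom_solution s skip index → Pre_solution s skip index → Spec_solution s skip index (solution s skip index)

-- ===== LEMMAS AND PROOFS =====

-- proof-side abbreviations
def alpL : List Char := "abcdefghijklmnopqrstuvwxyz".toList
def alpAt (idx : Nat) : Char := alpL.getD idx ' '
def pvV (skip : String) (c : Char) : Bool := !pvInSkip skip c
def valids (skip : String) : List Char := alpL.filter (pvV skip)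
def rk (skip : String) (idx : Nat) : Nat := ((alpL.take idx).filter (pvV skip)).length
def tgt (skip : String) (n : Nat) : Char := (valids skip).getD (n % (valids skip).length) ' '

theorem alp_eq : (PySem.List.pyRange 97 123 1).foldl (fun acc i => acc ++ [pvChr i]) [] = alpL := by
  decide

theorem len_alpL : alpL.length = 26 := rfl

theorem getElem?_alpL {idx : Nat} (h : idx < 26) : alpL[idx]? = some (alpAt idx) := by
  interval_cases idx <;> decide

theorem solLoop_mono (skip : String) (index : Int) :
    ∀ f1 f2 idx cnt c, f1 ≤ f2 → solLoop alpL skip index f1 idx cnt = some c →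
      solLoop alpL skip index f2 idx cnt = some c := by
  intro f1
  induction f1 with
  | zero => intro f2 idx cnt c _ h; simp [solLoop] at h
  | succ f ih =>
    intro f2 idx cnt c hle h
    obtain ⟨f2', rfl⟩ : ∃ f2', f2 = f2' + 1 := ⟨f2 - 1, by omega⟩
    have hle' : f ≤ f2' := by omega
    by_cases hidx : idx = alpL.length
    · simp only [solLoop, if_pos hidx] at h ⊢
      exact ih _ _ _ _ hle' h
    · simp only [solLoop, if_neg hidx] at h ⊢
      cases halp : alpL[idx]? with
      | none => rw [halp] at h; simp at h
      | some ch =>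
        rw [halp] at h
        dsimp only at h ⊢
        by_cases hs : pvInSkip skip ch
        · simp only [if_pos hs] at h ⊢; exact ih _ _ _ _ hle' h
        · simp only [if_neg hs] at h ⊢
          by_cases hc : cnt = index
          · simp only [if_pos hc] at h ⊢; exact h
          · simp only [if_neg hc] at h ⊢; exact ih _ _ _ _ hle' h

theorem rk_succ (skip : String) {j : Nat} (h : j < 26) :
    rk skip (j+1) = rk skip j + (if pvV skip (alpAt j) then 1 else 0) := by
  have hlen : j < alpL.length := by rw [len_alpL]; exact h
  unfold rk
  rw [List.take_add_one, List.getElem?_eq_getElem hlen]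
  simp only [Option.toList_some, List.filter_append, List.length_append, List.filter_cons]
  have : alpAt j = alpL[j] := by simp [alpAt, List.getD, List.getElem?_eq_getElem hlen]
  rw [this]
  split_ifs <;> simp

theorem skiprun (skip : String) (index : Int) :
    ∀ (d idx : Nat), idx + d ≤ 26 → (∀ m, idx ≤ m → m < idx + d → pvV skip (alpAt m) = false) →
      (∀ fuel cnt, solLoop alpL skip index (fuel + d) idx cnt = solLoop alpL skip index fuel (idx + d) cnt)
      ∧ rk skip (idx + d) = rk skip idx := by
  intro d
  induction d with
  | zero => intro idx _ _; exact ⟨fun fuel cnt => by simp, rfl⟩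
  | succ d ih =>
    intro idx hle hinv
    have hidx : idx < 26 := by omega
    have hV : pvV skip (alpAt idx) = false := hinv idx le_rfl (by omega)
    have hskip : pvInSkip skip (alpAt idx) = true := by
      unfold pvV at hV; simpa using hV
    obtain ⟨ihT, ihR⟩ := ih (idx+1) (by omega) (fun m hm1 hm2 => hinv m (by omega) (by omega))
    constructor
    · intro fuel cnt
      rw [show fuel + (d+1) = (fuel + d) + 1 by omega]
      have hone : solLoop alpL skip index ((fuel + d) + 1) idx cnt
          = solLoop alpL skip index (fuel + d) (idx+1) cnt := by
        simp only [solLoop, if_neg (show ¬ idx = alpL.length by rw [len_alpL]; omega),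
          getElem?_alpL hidx]
        rw [if_pos hskip]
      rw [hone, ihT fuel cnt]
      congr 1
      omega
    · have h1 : rk skip (idx+1) = rk skip idx := by
        rw [rk_succ skip hidx, hV]; simp
      rw [show idx + (d+1) = (idx+1) + d by omega, ihR, h1]

theorem wrap (skip : String) (index : Int) (fuel : Nat) (cnt : Int) :
    solLoop alpL skip index (fuel+1) 26 cnt = solLoop alpL skip index fuel 0 cnt := by
  simp [solLoop, len_alpL]

theorem reach' (skip : String) (index : Int) :
    ∀ (d idx : Nat), idx + d = 26 → (∃ m, idx ≤ m ∧ m < 26 ∧ pvV skip (alpAt m) = true) →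
      ∃ j, idx ≤ j ∧ j < 26 ∧ pvV skip (alpAt j) = true ∧ rk skip j = rk skip idx ∧
        ∀ fuel cnt, solLoop alpL skip index (fuel + (j - idx)) idx cnt = solLoop alpL skip index fuel j cnt := by
  intro d
  induction d with
  | zero => intro idx h hex; obtain ⟨m, h1, h2, _⟩ := hex; omega
  | succ d ih =>
    intro idx h hex
    have hidx : idx < 26 := by omega
    by_cases hv : pvV skip (alpAt idx) = true
    · exact ⟨idx, le_rfl, hidx, hv, rfl, fun fuel cnt => by simp⟩
    · have hvf : pvV skip (alpAt idx) = false := by simpa using hv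
      have hskip : pvInSkip skip (alpAt idx) = true := by unfold pvV at hvf; simpa using hvf
      have hex' : ∃ m, idx+1 ≤ m ∧ m < 26 ∧ pvV skip (alpAt m) = true := by
        obtain ⟨m, h1, h2, h3⟩ := hex
        refine ⟨m, ?_, h2, h3⟩
        rcases Nat.eq_or_lt_of_le h1 with heq | hlt
        · exact absurd h3 (by rw [← heq]; simp [hvf])
        · omega
      obtain ⟨j, hj1, hj2, hj3, hj4, hj5⟩ := ih (idx+1) (by omega) hex'
      refine ⟨j, by omega, hj2, hj3, ?_, ?_⟩
      · rw [hj4, rk_succ skip hidx, hvf]; simp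
      · intro fuel cnt
        rw [show fuel + (j - idx) = (fuel + (j - (idx+1))) + 1 by omega]
        have hone : solLoop alpL skip index ((fuel + (j - (idx+1))) + 1) idx cnt
            = solLoop alpL skip index (fuel + (j - (idx+1))) (idx+1) cnt := by
          simp only [solLoop, if_neg (show ¬ idx = alpL.length by rw [len_alpL]; omega),
            getElem?_alpL hidx]
          rw [if_pos hskip]
        rw [hone, hj5 fuel cnt]

theorem rk26 (skip : String) : rk skip 26 = (valids skip).length := by
  unfold rk valids
  rw [List.take_of_length_le (le_of_eq len_alpL)]

theorem rk0 (skip : String) : rk skip 0 = 0 := rfl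

theorem singleton_infix (c : Char) (l : List Char) : [c] <:+: l ↔ c ∈ l := by
  constructor
  · rintro ⟨s, t, rfl⟩; simp
  · intro h; obtain ⟨s, t, rfl⟩ := List.append_of_mem h; exact ⟨s, t, by simp⟩

theorem pvInSkip_true_iff (skip : String) (c : Char) : pvInSkip skip c = true ↔ c ∈ skip.toList := by
  rw [pvInSkip, PySem.Str.isIn_iff_infix]
  simpa using singleton_infix c skip.toList

theorem pvV_true_iff (skip : String) (c : Char) : pvV skip c = true ↔ c ∉ skip.toList := by
  rw [pvV, Bool.not_eq_eq_eq_not, Bool.not_true, ← Bool.not_eq_true, pvInSkip_true_iff]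

theorem tgt_congr (skip : String) {a b : Nat} (h : a % (valids skip).length = b % (valids skip).length) :
    tgt skip a = tgt skip b := by unfold tgt; rw [h]

theorem nv_pos_exists (skip : String) (h : 0 < (valids skip).length) :
    ∃ m, m < 26 ∧ pvV skip (alpAt m) = true := by
  obtain ⟨c, hc⟩ := List.exists_mem_of_length_pos h
  rw [valids, List.mem_filter] at hc
  obtain ⟨m, hm, hme⟩ := List.mem_iff_getElem.mp hc.1
  refine ⟨m, by simpa [len_alpL] using hm, ?_⟩
  simp [alpAt, List.getD, List.getElem?_eq_getElem hm, hme, hc.2]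

theorem reach (skip : String) (index : Int) {idx : Nat} (hidx : idx ≤ 26)
    (hnv : 0 < (valids skip).length) :
    ∃ j c, j < 26 ∧ pvV skip (alpAt j) = true ∧ c ≤ 59 ∧
      (∀ k : Nat, (rk skip idx + k) % (valids skip).length = (rk skip j + k) % (valids skip).length) ∧
      ∀ fuel cnt, solLoop alpL skip index (fuel + c) idx cnt = solLoop alpL skip index fuel j cnt := by
  by_cases hex : ∃ m, idx ≤ m ∧ m < 26 ∧ pvV skip (alpAt m) = true
  · obtain ⟨j, hj1, hj2, hj3, hj4, hj5⟩ := reach' skip index (26 - idx) idx (by omega) hex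
    refine ⟨j, j - idx, hj2, hj3, by omega, fun k => by rw [hj4], hj5⟩
  · push_neg at hex
    have hinv : ∀ m, idx ≤ m → m < idx + (26 - idx) → pvV skip (alpAt m) = false := by
      intro m h1 h2
      simpa using hex m h1 (by omega)
    obtain ⟨sT, sR⟩ := skiprun skip index (26 - idx) idx (by omega) hinv
    obtain ⟨m, hm1, hm2⟩ := nv_pos_exists skip hnv
    obtain ⟨j, hj1, hj2, hj3, hj4, hj5⟩ := reach' skip index 26 0 (by omega)
      ⟨m, Nat.zero_le m, hm1, hm2⟩
    refine ⟨j, (26 - idx) + 1 + j, hj2, hj3, by omega, ?_, ?_⟩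
    · intro k
      have h1 : rk skip idx = (valids skip).length := by
        have h2 := sR
        rw [show idx + (26 - idx) = 26 by omega, rk26] at h2
        omega
      rw [h1, hj4, rk0]
      simp [Nat.add_mod_left]
    · intro fuel cnt
      rw [show fuel + ((26 - idx) + 1 + j) = ((fuel + j) + 1) + (26 - idx) by omega,
        sT ((fuel + j) + 1) cnt, show idx + (26 - idx) = 26 by omega,
        wrap skip index (fuel + j) cnt]
      have h3 := hj5 fuel cnt
      rw [Nat.sub_zero] at h3
      exact h3

-- l[j] valid → it sits in l.filter p at position |take j filtered|
theorem filter_getD (p : Char → Bool) :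
    ∀ (l : List Char) (j : Nat), j < l.length → p (l.getD j ' ') = true →
      ((l.take j).filter p).length < (l.filter p).length ∧
      (l.filter p).getD (((l.take j).filter p).length) ' ' = l.getD j ' ' := by
  intro l
  induction l with
  | nil => intro j h; simp at h
  | cons x xs ih =>
    intro j hj hp
    cases j with
    | zero =>
      simp only [List.take_zero, List.filter_nil, List.length_nil, List.getD_cons_zero] at hp ⊢
      simp [hp]
    | succ j' =>
      have hj' : j' < xs.length := by simpa using hj
      have hp' : p (xs.getD j' ' ') = true := by simpa using hp
      obtain ⟨ih1, ih2⟩ := ih j' hj' hp'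
      simp only [List.take_succ_cons, List.filter_cons, List.getD_cons_succ]
      by_cases hx : p x
      · simp only [if_pos hx, List.length_cons, List.getD_cons_succ]
        exact ⟨by omega, ih2⟩
      · simp only [if_neg hx]
        exact ⟨ih1, ih2⟩

theorem mainLoop (skip : String) (index : Int) :
    ∀ (k idx : Nat) (cnt : Int), idx ≤ 26 → cnt ≤ index → index - cnt = (k : Int) → 0 < (valids skip).length →
      ∃ f ≤ 60 * (k + 2), solLoop alpL skip index f idx cnt = some (tgt skip (rk skip idx + k)) := by
  intro k
  induction k with
  | zero =>
    intro idx cnt hidx hc hk hnv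
    obtain ⟨j, c, hj2, hj3, hcle, hmod, htr⟩ := reach skip index hidx hnv
    have hjlen : j < alpL.length := by rw [len_alpL]; exact hj2
    have hskip : pvInSkip skip (alpAt j) = false := by unfold pvV at hj3; simpa using hj3
    have hcnt : cnt = index := by omega
    have hstep : solLoop alpL skip index 1 j cnt = some (alpAt j) := by
      simp only [solLoop, if_neg (show ¬ j = alpL.length by rw [len_alpL]; omega),
        getElem?_alpL hj2]
      rw [if_neg (by simp [hskip]), if_pos hcnt]
    refine ⟨1 + c, by omega, ?_⟩
    rw [htr 1 cnt, hstep]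
    congr 1
    obtain ⟨hlt, heq⟩ := filter_getD (pvV skip) alpL j hjlen hj3
    have hlt' : rk skip j < (valids skip).length := hlt
    have h4 : (rk skip j + 0) % (valids skip).length = rk skip j := by
      simp [Nat.mod_eq_of_lt hlt']
    unfold tgt
    rw [hmod 0, h4]
    exact heq.symm
  | succ k ih =>
    intro idx cnt hidx hc hk hnv
    obtain ⟨j, c, hj2, hj3, hcle, hmod, htr⟩ := reach skip index hidx hnv
    have hjlen : j < alpL.length := by rw [len_alpL]; exact hj2
    have hskip : pvInSkip skip (alpAt j) = false := by unfold pvV at hj3; simpa using hj3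
    have hcnt : ¬ (cnt = index) := by omega
    obtain ⟨f', hf'le, hf'⟩ := ih (j+1) (cnt+1) (by omega) (by omega)
      (by push_cast at hk ⊢; omega) hnv
    have hstep : solLoop alpL skip index (f' + 1) j cnt
        = solLoop alpL skip index f' (j+1) (cnt+1) := by
      simp only [solLoop, if_neg (show ¬ j = alpL.length by rw [len_alpL]; omega),
        getElem?_alpL hj2]
      rw [if_neg (by simp [hskip]), if_neg hcnt]
    refine ⟨(f' + 1) + c, by omega, ?_⟩
    rw [htr (f' + 1) cnt, hstep, hf']
    congr 1
    have h5 : rk skip (j+1) = rk skip j + 1 := by rw [rk_succ skip hj2, hj3]; simp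
    apply tgt_congr
    rw [h5, hmod (k+1)]
    congr 1
    omega

theorem index?_alpL {c : Char} (h1 : 97 ≤ c.toNat) (h2 : c.toNat ≤ 122) :
    PySem.List.index? alpL c = some (c.toNat - 97) := by
  have hlt : c.toNat - 97 < 26 := by omega
  have hc : c = alpAt (c.toNat - 97) := by
    have hAt : ∀ i : Fin 26, (alpAt i.val).toNat = 97 + i.val := by decide
    apply Char.ext; apply UInt32.toNat_inj.mp
    show c.toNat = (alpAt _).toNat
    rw [hAt ⟨_, hlt⟩]; show c.toNat = 97 + (c.toNat - 97); omega
  have d1 : ∀ i : Fin 26, PySem.List.index? alpL (alpAt i.val) = some i.val := by decide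
  calc PySem.List.index? alpL c = PySem.List.index? alpL (alpAt (c.toNat - 97)) := by rw [← hc]
    _ = some (c.toNat - 97) := d1 ⟨_, hlt⟩

theorem rkB (skip : String) {c : Char} (h1 : 97 ≤ c.toNat) (h2 : c.toNat ≤ 122) :
    (valids skip).countP (fun v => decide (v < c)) = rk skip (c.toNat - 97) := by
  have hlt : c.toNat - 97 < 26 := by omega
  have hc : c = alpAt (c.toNat - 97) := by
    have hAt : ∀ i : Fin 26, (alpAt i.val).toNat = 97 + i.val := by decide
    apply Char.ext; apply UInt32.toNat_inj.mp
    show c.toNat = (alpAt _).toNat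
    rw [hAt ⟨_, hlt⟩]; show c.toNat = 97 + (c.toNat - 97); omega
  have hcomm : ∀ (p q : Char → Bool) (l : List Char), (l.filter p).filter q = (l.filter q).filter p := by
    intro p q l; simp [List.filter_filter, Bool.and_comm]
  have d4 : ∀ i : Fin 26, alpL.filter (fun v => decide (v < alpAt i.val)) = alpL.take i.val := by decide
  calc (valids skip).countP (fun v => decide (v < c))
      = ((alpL.filter (pvV skip)).filter (fun v => decide (v < alpAt (c.toNat - 97)))).length := by
        rw [List.countP_eq_length_filter, ← hc]; rfl
    _ = ((alpL.filter (fun v => decide (v < alpAt (c.toNat - 97)))).filter (pvV skip)).length := by rw [hcomm]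
    _ = ((alpL.take (c.toNat - 97)).filter (pvV skip)).length := by rw [d4 ⟨_, hlt⟩]
    _ = rk skip (c.toNat - 97) := rfl

-- B's per-character value
theorem altChar (skip : String) (index : Int) {c : Char} (h1 : 97 ≤ c.toNat) (h2 : c.toNat ≤ 122)
    (hi : 0 ≤ index) (hnv : 0 < (valids skip).length) :
    ((PySem.Int.mod? (((valids skip).countP (fun v => decide (v < c)) : Int) + index) ((valids skip).length : Int)).bind
        (fun m => PySem.List.pyGet? (valids skip) m)).getD ' '
      = tgt skip (rk skip (c.toNat - 97) + index.toNat) := by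
  rw [rkB skip h1 h2]
  have hnvz : ((valids skip).length : Int) ≠ 0 := by
    exact_mod_cast (by omega : (valids skip).length ≠ 0)
  have hmm : PySem.Int.mod? ((rk skip (c.toNat - 97) : Int) + index) ((valids skip).length : Int)
      = some (PySem.Int.mod ((rk skip (c.toNat - 97) : Int) + index) ((valids skip).length : Int)) := by
    have hne : valids skip ≠ [] := by intro h3; rw [h3] at hnv; simp at hnv
    simp [PySem.Int.mod?, PySem.Int.mod, hne]
  rw [hmm]
  rw [PySem.Int.mod_eq_emod_of_pos (by exact_mod_cast hnv)]
  rw [show ((rk skip (c.toNat - 97) : Int) + index) = ((rk skip (c.toNat - 97) + index.toNat : Nat) : Int) by push_cast; omega]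
  rw [← Int.natCast_mod]
  have hM : (rk skip (c.toNat - 97) + index.toNat) % (valids skip).length < (valids skip).length :=
    Nat.mod_lt _ hnv
  simp only [Option.bind_some, PySem.List.pyGet?_natCast, List.getElem?_eq_getElem hM,
    Option.getD_some]
  simp [tgt, List.getD, List.getElem?_eq_getElem hM]

-- A's per-character value
theorem aChar (skip : String) (index : Int) {c : Char} (h1 : 97 ≤ c.toNat) (h2 : c.toNat ≤ 122)
    (hi : 0 ≤ index) (hnv : 0 < (valids skip).length) :
    solLoop alpL skip index (60 * (index.toNat + 2)) (c.toNat - 97) 0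
      = some (tgt skip (rk skip (c.toNat - 97) + index.toNat)) := by
  obtain ⟨f, hfle, hf⟩ := mainLoop skip index index.toNat (c.toNat - 97) 0
    (by omega) hi (by omega) hnv
  exact solLoop_mono skip index f _ _ _ _ hfle hf

theorem mainFold (skip : String) (index : Int) (hi : 0 ≤ index) (hnv : 0 < (valids skip).length) :
    ∀ (cs : List Char) (acc : List Char), (∀ c ∈ cs, 97 ≤ c.toNat ∧ c.toNat ≤ 122) →
      cs.foldl (fun (acc : Option (List Char)) i =>
          acc.bind fun answer =>
          (PySem.List.index? alpL i).bind fun idx =>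
          (solLoop alpL skip index (60 * (index.toNat + 2)) idx 0).map fun ch => answer ++ [ch])
        (some acc)
      = some (acc ++ cs.map (fun ch => tgt skip (rk skip (ch.toNat - 97) + index.toNat))) := by
  intro cs
  induction cs with
  | nil => intro acc _; simp
  | cons x xs ih =>
    intro acc hall
    have hx := hall x (by simp)
    have hxs : ∀ c ∈ xs, 97 ≤ c.toNat ∧ c.toNat ≤ 122 := fun c hc => hall c (by simp [hc])
    simp only [List.foldl_cons, Option.bind_some, List.map_cons]
    rw [index?_alpL hx.1 hx.2]
    simp only [Option.bind_some]
    rw [aChar skip index hx.1 hx.2 hi hnv]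
    simp only [Option.map_some]
    rw [ih (acc ++ [tgt skip (rk skip (x.toNat - 97) + index.toNat)]) hxs]
    simp

-- ===== VERDICT (by name: the statement is the Claim_ definition above) =====
theorem solution_spec : Claim_equal_solution := by
  unfold Claim_equal_solution
  intro s skip index hdom hpre
  unfold Spec_solution solution solution_alt
  unfold Pre_solution at hpre
  simp only [Bool.and_eq_true, Bool.or_eq_true, List.all_eq_true, List.any_eq_true,
    decide_eq_true_eq] at hpre
  obtain ⟨hlc, hrest⟩ := hpre
  by_cases hempty : s.toList = []
  · simp [hempty]
  · have hrest' := hrest.resolve_left (by simp [List.isEmpty_iff, hempty])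
    obtain ⟨hi, c0, hc0mem, hc0skip⟩ := hrest'
    have hc0nmem : c0 ∉ skip.toList := by
      intro hmem
      rw [List.contains_iff_mem.mpr hmem] at hc0skip
      simp at hc0skip
    have hnv : 0 < (valids skip).length := by
      apply List.length_pos_of_mem (a := c0)
      rw [valids, List.mem_filter]
      exact ⟨hc0mem, (pvV_true_iff skip c0).mpr hc0nmem⟩
    simp only [alp_eq]
    rw [mainFold skip index hi hnv s.toList [] (fun c hc => hlc c hc)]
    simp only [Option.getD_some, List.nil_append]
    congr 1
    apply List.map_congr_left
    intro ch hch
    have hc := hlc ch hch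
    rw [show ("abcdefghijklmnopqrstuvwxyz".toList.filter (fun c => !pvInSkip skip c)) = valids skip from rfl]
    exact (altChar skip index hc.1 hc.2 hi hnv).symm
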